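-- pv_equiv track=rewrite | github.com/teberr/- | 프로그래머스 2단계/n^2 배열 자르기.py | solution
-- ===== SOURCE A (Python) =====
-- def solution(n, left, right):
--     answer = [ ]
--
--     for i in range(left,right+1):
--         temp=i//n
--         if i%n<=temp:
--             answer.append(1+temp)
--         else:
--             answer.append(i%n+1)
--
--     return answer
-- ===== SOURCE B (Python) =====
-- def solution(n, left, right):
--     # Row-by-row over the n x n grid: value at (r, c) is max(r, c) + 1.
--     startRow = left // n
--     endRow = right // n
--     answer = []
--     for r in range(startRow, endRow + 1):
--         colStart = left % n if r == startRow else 0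
--         colEnd = right % n if r == endRow else n - 1
--         for c in range(colStart, colEnd + 1):
--             answer.append(max(r, c) + 1)
--     return answer
-- ===== Notes on version B (the rewrite author's own statement) =====
-- stated objective: alternative
-- what changed: Replaces the single flat scan over indices left..right (with a branch computing i//n vs i%n per index) by a nested row-by-row construction: compute startRow=left//n and endRow=right//n and emit each row segment with explicit column bounds, appending max(r,c)+1.
-- outside the precondition, e.g. on solution(-2, 0, 2): A returns [1, 0, 1], B returns []; on solution(0, 0, 2): A raises ZeroDivisionError, B raises ZeroDivisionError
import Mathlib
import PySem

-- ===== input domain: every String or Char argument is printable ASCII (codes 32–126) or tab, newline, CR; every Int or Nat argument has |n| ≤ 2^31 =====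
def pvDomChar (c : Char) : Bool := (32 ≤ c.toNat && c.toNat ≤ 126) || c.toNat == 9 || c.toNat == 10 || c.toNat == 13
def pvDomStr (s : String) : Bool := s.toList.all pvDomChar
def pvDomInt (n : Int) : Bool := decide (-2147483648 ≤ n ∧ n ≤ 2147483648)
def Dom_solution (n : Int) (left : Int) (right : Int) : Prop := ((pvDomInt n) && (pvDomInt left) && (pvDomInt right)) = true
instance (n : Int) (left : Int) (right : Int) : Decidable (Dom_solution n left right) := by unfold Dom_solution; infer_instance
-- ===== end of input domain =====

-- B builds the slice row-segment by row-segment over the n x n grid instead of A's flat index scan; alternative decomposition, same cost.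

-- ===== PORT A =====
def solution (n : Int) (left : Int) (right : Int) : List Int :=
  (PySem.List.pyRange left (right + 1) 1).foldl
    (fun answer i =>
      let temp := PySem.Int.floordiv i n
      if PySem.Int.mod i n ≤ temp then answer ++ [1 + temp]
      else answer ++ [PySem.Int.mod i n + 1])
    []

-- ===== PORT B =====
def solution_alt (n : Int) (left : Int) (right : Int) : List Int :=
  let startRow := PySem.Int.floordiv left n
  let endRow := PySem.Int.floordiv right n
  (PySem.List.pyRange startRow (endRow + 1) 1).foldl
    (fun answer r =>
      let colStart := if r = startRow then PySem.Int.mod left n else 0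
      let colEnd := if r = endRow then PySem.Int.mod right n else n - 1
      (PySem.List.pyRange colStart (colEnd + 1) 1).foldl
        (fun answer c => answer ++ [max r c + 1]) answer)
    []

-- ===== PRECONDITION & SPEC =====
-- Pre_ excludes n = 0 (A raises ZeroDivisionError) and n < 0 (outside the natural
-- n×n-grid domain; A's values there are accidents of floor division with a negative divisor).
def Pre_solution (n : Int) (left : Int) (right : Int) : Prop := 1 ≤ n
instance (n : Int) (left : Int) (right : Int) : Decidable (Pre_solution n left right) := by unfold Pre_solution; infer_instance
def pvWitness_solution : Int × Int × Int := (3, 2, 5)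
def Spec_solution (n : Int) (left : Int) (right : Int) (out : List Int) : Prop := out = solution_alt n left right
instance (n : Int) (left : Int) (right : Int) (out : List Int) : Decidable (Spec_solution n left right out) := by unfold Spec_solution; infer_instance

-- ===== CLAIM (what is proved, stated in full; the proofs are below) =====
def Claim_equal_solution : Prop := ∀ (n : Int) (left : Int) (right : Int), Dom_solution n left right → Pre_solution n left right → Spec_solution n left right (solution n left right)

-- ===== LEMMAS AND PROOFS =====

theorem solution_eq_map (n left right : Int) :
    solution n left right =
      (PySem.List.pyRange left (right + 1) 1).map
        (fun i => max (PySem.Int.floordiv i n) (PySem.Int.mod i n) + 1) := by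
  unfold solution
  have h : ∀ (init : List Int) (l : List Int),
      l.foldl (fun answer i =>
        let temp := PySem.Int.floordiv i n
        if PySem.Int.mod i n ≤ temp then answer ++ [1 + temp]
        else answer ++ [PySem.Int.mod i n + 1]) init
      = init ++ l.map (fun i => max (PySem.Int.floordiv i n) (PySem.Int.mod i n) + 1) := by
    intro init l
    induction l generalizing init with
    | nil => simp
    | cons x xs ih =>
      simp only [List.foldl, List.map, ih]
      by_cases hc : PySem.Int.mod x n ≤ PySem.Int.floordiv x n
      · simp [hc, List.append_assoc]
        ring_nf
      · simp [hc, max_eq_right (le_of_not_ge hc), List.append_assoc]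
  simpa using h [] _

theorem solution_alt_eq_flatMap (n left right : Int) :
    solution_alt n left right =
      (PySem.List.pyRange (PySem.Int.floordiv left n) (PySem.Int.floordiv right n + 1) 1).flatMap
        (fun r =>
          (PySem.List.pyRange
            (if r = PySem.Int.floordiv left n then PySem.Int.mod left n else 0)
            ((if r = PySem.Int.floordiv right n then PySem.Int.mod right n else n - 1) + 1) 1).map
            (fun c => max r c + 1)) := by
  unfold solution_alt
  simp only [PySem.List.foldl_append_singleton_eq_map, PySem.List.foldl_append_eq_flatMap,
    List.nil_append]

-- one row: mapping the max-formula over a flat index range on which i // n is constantly r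
-- equals mapping (max r · + 1) over the shifted column range
theorem row_map (n r : Int) :
    ∀ (a b : Int), (∀ i, a ≤ i → i < b → PySem.Int.floordiv i n = r) →
      (PySem.List.pyRange a b 1).map
        (fun i => max (PySem.Int.floordiv i n) (PySem.Int.mod i n) + 1)
      = (PySem.List.pyRange (a - r * n) (b - r * n) 1).map (fun c => max r c + 1) := by
  intro a b
  induction hk : (b - a).toNat generalizing a with
  | zero =>
    intro _
    have hba : b ≤ a := by omega
    rw [PySem.List.pyRange_one_eq_nil hba, PySem.List.pyRange_one_eq_nil (by omega)]
    simp
  | succ k ih =>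
    intro hrow
    have hab : a < b := by omega
    rw [PySem.List.pyRange_one_cons hab, PySem.List.pyRange_one_cons (show a - r * n < b - r * n by omega)]
    simp only [List.map_cons]
    have hfa : PySem.Int.floordiv a n = r := hrow a le_rfl hab
    have hma : PySem.Int.mod a n = a - r * n := by
      have := PySem.Int.floordiv_mul_add_mod a n
      rw [hfa] at this; omega
    rw [hfa, hma, ih (a := a + 1) (by omega) (fun i h1 h2 => hrow i (by omega) h2)]
    have : a + 1 - r * n = a - r * n + 1 := by omega
    rw [this]

theorem flatMap_congr_mem {α β : Type} (l : List α) (f g : α → List β)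
    (h : ∀ x ∈ l, f x = g x) : l.flatMap f = l.flatMap g := by
  induction l with
  | nil => rfl
  | cons x xs ih =>
    simp only [List.flatMap_cons, h x (List.mem_cons_self ..),
      ih (fun y hy => h y (List.mem_cons_of_mem _ hy))]

-- the main nested-vs-flat lemma: induct on the number of rows, peeling the first row off
theorem main_lemma (n right : Int) (hn : 0 < n) :
    ∀ (k : Nat) (left : Int),
      (PySem.Int.floordiv right n + 1 - PySem.Int.floordiv left n).toNat = k →
      (PySem.List.pyRange left (right + 1) 1).map
        (fun i => max (PySem.Int.floordiv i n) (PySem.Int.mod i n) + 1)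
      = (PySem.List.pyRange (PySem.Int.floordiv left n) (PySem.Int.floordiv right n + 1) 1).flatMap
          (fun r =>
            (PySem.List.pyRange
              (if r = PySem.Int.floordiv left n then PySem.Int.mod left n else 0)
              ((if r = PySem.Int.floordiv right n then PySem.Int.mod right n else n - 1) + 1) 1).map
              (fun c => max r c + 1)) := by
  intro k
  induction k with
  | zero =>
    intro left hk
    set sR := PySem.Int.floordiv left n with hsR
    set eR := PySem.Int.floordiv right n with heR
    have hlt : eR + 1 ≤ sR := by omega
    have hlr : right + 1 ≤ left := by
      by_contra h
      have : sR ≤ eR := by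
        rw [hsR, heR, PySem.Int.floordiv_eq_ediv_of_pos hn, PySem.Int.floordiv_eq_ediv_of_pos hn]
        exact Int.ediv_le_ediv hn (by omega)
      omega
    rw [PySem.List.pyRange_one_eq_nil hlr, PySem.List.pyRange_one_eq_nil hlt]
    simp
  | succ k ih =>
    intro left hk
    set sR := PySem.Int.floordiv left n with hsR
    set eR := PySem.Int.floordiv right n with heR
    -- bracket facts for left's row
    have hbr : sR * n ≤ left ∧ left < (sR + 1) * n := by
      rw [hsR]; exact (PySem.Int.floordiv_eq_iff_of_pos hn).mp rfl
    have hbrR : eR * n ≤ right ∧ right < (eR + 1) * n := by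
      rw [heR]; exact (PySem.Int.floordiv_eq_iff_of_pos hn).mp rfl
    by_cases hse : sR = eR
    · -- single row: every flat index i has floordiv i n = sR
      have hrow : ∀ i, left ≤ i → i < right + 1 → PySem.Int.floordiv i n = sR := by
        intro i h1 h2
        rw [PySem.Int.floordiv_eq_iff_of_pos hn]
        constructor
        · exact le_trans hbr.1 h1
        · have := hbrR.2; rw [← hse] at this; omega
      rw [row_map n sR left (right + 1) hrow]
      rw [PySem.List.pyRange_one_cons (a := sR) (b := eR + 1) (by omega),
        PySem.List.pyRange_one_eq_nil (a := sR + 1) (b := eR + 1) (by omega)]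
      simp only [List.flatMap_cons, List.flatMap_nil, List.append_nil]
      have hmL : PySem.Int.mod left n = left - sR * n := by
        have := PySem.Int.floordiv_mul_add_mod left n
        rw [← hsR] at this; omega
      have hmR : PySem.Int.mod right n = right - sR * n := by
        have := PySem.Int.floordiv_mul_add_mod right n
        rw [← heR, ← hse] at this; omega
      rw [if_pos hse, hmL, hmR]
      have : right - sR * n + 1 = right + 1 - sR * n := by omega
      rw [this]
      simp
    · -- at least two rows: peel off the first row at boundary (sR+1)*n
      have hsRe : sR ≤ eR := by omega
      have hslt : sR < eR := lt_of_le_of_ne hsRe hse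
      have hbound : left ≤ (sR + 1) * n ∧ (sR + 1) * n ≤ right + 1 := by
        constructor
        · exact le_of_lt hbr.2
        · have := hbrR.1
          nlinarith [hslt]
      -- split the flat range at the row boundary
      rw [PySem.List.pyRange_one_append left ((sR + 1) * n) (right + 1) hbound.1 hbound.2,
        List.map_append]
      -- first row of the flat side
      have hrow1 : ∀ i, left ≤ i → i < (sR + 1) * n → PySem.Int.floordiv i n = sR := by
        intro i h1 h2
        rw [PySem.Int.floordiv_eq_iff_of_pos hn]
        exact ⟨le_trans hbr.1 h1, h2⟩
      rw [row_map n sR left ((sR + 1) * n) hrow1]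
      -- recursive call on left' = (sR+1)*n
      have hfd' : PySem.Int.floordiv ((sR + 1) * n) n = sR + 1 := by
        rw [PySem.Int.floordiv_eq_iff_of_pos hn]
        constructor
        · nlinarith
        · nlinarith
      have hmd' : PySem.Int.mod ((sR + 1) * n) n = 0 := by
        have := PySem.Int.floordiv_mul_add_mod ((sR + 1) * n) n
        rw [hfd'] at this; omega
      have hk' : (PySem.Int.floordiv right n + 1 - PySem.Int.floordiv ((sR + 1) * n) n).toNat = k := by
        rw [hfd', ← heR]; omega
      rw [ih ((sR + 1) * n) hk', hfd', hmd']
      -- rows side: peel the first row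
      rw [PySem.List.pyRange_one_cons (a := sR) (b := eR + 1) (by omega)]
      simp only [List.flatMap_cons]
      have hsne : ¬ (sR = eR) := hse
      rw [if_neg (by omega : ¬ sR = eR)]
      have hmL : PySem.Int.mod left n = left - sR * n := by
        have := PySem.Int.floordiv_mul_add_mod left n
        rw [← hsR] at this; omega
      rw [hmL]
      have hcE : (sR + 1) * n - sR * n = n - 1 + 1 := by ring
      rw [hcE]
      congr 1
      -- remaining rows: the two flatMap functions agree on r ≥ sR + 1
      apply flatMap_congr_mem
      intro r hr
      have hrmem := (PySem.List.mem_pyRange_one).mp hr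
      have hr1 : ¬ r = sR := by omega
      rw [if_neg hr1]
      by_cases hr2 : r = sR + 1
      · rw [if_pos hr2]
      · rw [if_neg hr2]

-- ===== VERDICT (by name: the statement is the Claim_ definition above) =====
theorem solution_spec : Claim_equal_solution := by
  unfold Claim_equal_solution
  intro n left right _ hpre
  unfold Spec_solution
  rw [solution_eq_map, solution_alt_eq_flatMap]
  exact main_lemma n right hpre _ left rfl
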